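-- pv_equiv track=rewrite | github.com/mbt1/LanguageLearnApp | server/srs/difficulty.py | difficulty_presentation
-- ===== SOURCE A (Python) =====
-- DIFFICULTY_CONFIG: list[dict] = [
--     {"level": 10, "exercise_type": "translate", "presentation": "mc",      "min_stability": 0.0},
--     {"level": 20, "exercise_type": "translate", "presentation": "arrange", "min_stability": 1.0},
--     {"level": 30, "exercise_type": "cloze",     "presentation": "mc",      "min_stability": 3.0},
--     {"level": 40, "exercise_type": "cloze",     "presentation": "typing",  "min_stability": 10.0},
--     {"level": 50, "exercise_type": "translate",  "presentation": "typing",  "min_stability": 30.0},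
-- ]
--
-- _LEVEL_MAP: dict[int, dict] = {entry["level"]: entry for entry in DIFFICULTY_CONFIG}
--
-- def difficulty_presentation(level: int) -> str:
--     """Return the presentation mode string for a difficulty level."""
--     entry = _LEVEL_MAP.get(level)
--     if entry:
--         return entry["presentation"]
--     for entry in reversed(DIFFICULTY_CONFIG):
--         if entry["level"] <= level:
--             return entry["presentation"]
--     return DIFFICULTY_CONFIG[0]["presentation"]
-- ===== SOURCE B (Python) =====
-- DIFFICULTY_CONFIG: list[dict] = [
--     {"level": 10, "exercise_type": "translate", "presentation": "mc",      "min_stability": 0.0},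
--     {"level": 20, "exercise_type": "translate", "presentation": "arrange", "min_stability": 1.0},
--     {"level": 30, "exercise_type": "cloze",     "presentation": "mc",      "min_stability": 3.0},
--     {"level": 40, "exercise_type": "cloze",     "presentation": "typing",  "min_stability": 10.0},
--     {"level": 50, "exercise_type": "translate",  "presentation": "typing",  "min_stability": 30.0},
-- ]
--
-- _LEVELS: list[int] = [entry["level"] for entry in DIFFICULTY_CONFIG]
--
-- def difficulty_presentation(level: int) -> str:
--     """Return the presentation mode string for a difficulty level."""
--     # binary search: index of the largest threshold <= level (clamped to 0)
--     lo, hi = 0, len(_LEVELS)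
--     while lo < hi:
--         mid = (lo + hi) // 2
--         if _LEVELS[mid] <= level:
--             lo = mid + 1
--         else:
--             hi = mid
--     return DIFFICULTY_CONFIG[max(0, lo - 1)]["presentation"]
-- ===== Notes on version B (the rewrite author's own statement) =====
-- stated objective: idiomatic
-- what changed: Replaces the dict fast-path plus reversed linear scan with a single hand-written binary search (bisect_right) over the ascending level thresholds, clamping below-range levels to the first entry's presentation.
import Mathlib
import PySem

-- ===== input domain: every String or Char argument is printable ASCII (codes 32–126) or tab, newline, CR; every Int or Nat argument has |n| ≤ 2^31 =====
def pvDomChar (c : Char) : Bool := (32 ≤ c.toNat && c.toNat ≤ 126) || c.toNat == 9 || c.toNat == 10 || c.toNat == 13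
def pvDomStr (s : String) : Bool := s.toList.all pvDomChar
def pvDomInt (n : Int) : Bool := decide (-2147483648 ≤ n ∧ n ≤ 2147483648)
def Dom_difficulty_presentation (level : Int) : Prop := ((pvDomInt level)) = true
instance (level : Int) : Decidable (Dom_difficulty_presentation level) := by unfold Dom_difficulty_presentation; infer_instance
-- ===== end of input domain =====

-- B replaces A's dict fast-path + reversed linear scan by a hand-written binary search over the
-- ascending level thresholds (objective: idiomatic threshold lookup; same O(1) cost on the fixed table).
-- Entries are (level, exercise_type, presentation); the unused float field min_stability is omitted.

-- ===== PORT A =====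
def pvConfigA : List (Int × String × String) :=
  [(10, "translate", "mc"), (20, "translate", "arrange"), (30, "cloze", "mc"),
   (40, "cloze", "typing"), (50, "translate", "typing")]

def pvLevelMapA : PySem.Dict Int (Int × String × String) :=
  pvConfigA.foldl (fun d e => d.insert e.1 e) PySem.Dict.empty

def pvScanRevA (level : Int) : List (Int × String × String) → String
  | [] => (PySem.List.pyGetD pvConfigA 0 (0, "", "")).2.2
  | e :: rest => if e.1 ≤ level then e.2.2 else pvScanRevA level rest

def difficulty_presentation (level : Int) : String :=
  match PySem.Dict.get? pvLevelMapA level with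
  | some e => e.2.2          -- a fetched entry dict is non-empty, hence truthy
  | none => pvScanRevA level pvConfigA.reverse

-- ===== PORT B =====
def pvConfigB : List (Int × String × String) :=
  [(10, "translate", "mc"), (20, "translate", "arrange"), (30, "cloze", "mc"),
   (40, "cloze", "typing"), (50, "translate", "typing")]

def pvLevelsB : List Int := pvConfigB.map (fun e => e.1)

def pvBisectB (level : Int) (lo hi : Nat) : Nat :=
  if lo < hi then
    let mid := (lo + hi) / 2
    if pvLevelsB.getD mid 0 ≤ level then pvBisectB level (mid + 1) hi
    else pvBisectB level lo mid
  else lo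
termination_by hi - lo
decreasing_by all_goals omega

def difficulty_presentation_alt (level : Int) : String :=
  let lo := pvBisectB level 0 pvLevelsB.length
  (pvConfigB.getD (max 0 (lo - 1)) (0, "", "")).2.2

-- ===== PRECONDITION & SPEC =====
def Spec_difficulty_presentation (level : Int) (out : String) : Prop := out = difficulty_presentation_alt level
instance (level : Int) (out : String) : Decidable (Spec_difficulty_presentation level out) := by unfold Spec_difficulty_presentation; infer_instance

-- ===== CLAIM (what is proved, stated in full; the proofs are below) =====
def Claim_equal_difficulty_presentation : Prop := ∀ (level : Int), Dom_difficulty_presentation level → Spec_difficulty_presentation level (difficulty_presentation level)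

-- ===== LEMMAS AND PROOFS =====

-- ===== VERDICT (by name: the statement is the Claim_ definition above) =====
theorem difficulty_presentation_spec : Claim_equal_difficulty_presentation := by
  intro level _
  unfold Spec_difficulty_presentation difficulty_presentation difficulty_presentation_alt
  by_cases e10 : level = 10 <;> by_cases e20 : level = 20 <;> by_cases e30 : level = 30 <;>
    by_cases e40 : level = 40 <;> by_cases e50 : level = 50 <;>
  simp_all [pvLevelMapA, pvConfigA, pvConfigB, pvLevelsB, pvScanRevA, pvBisectB,
            PySem.Dict.get?_insert, PySem.List.pyGetD] <;>
  (try (split_ifs <;> simp_all)) <;> omega
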